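-- pv_equiv track=rewrite | github.com/jacobposchl/flatgrad | flatgrad/sampling/training.py | adaptive_measurement_schedule
-- ===== SOURCE A (Python) =====
-- from typing import Callable, Optional, Dict, List
--
-- def adaptive_measurement_schedule(total_epochs: int) -> List[int]:
--     """
--     Generate adaptive lambda measurement schedule.
--
--     Measures more frequently early in training when lambda changes rapidly,
--     less frequently later when lambda has stabilized.
--
--     Args:
--         total_epochs: Total number of training epochs
--
--     Returns:
--         List of epoch numbers when lambda should be measured
--     """
--     measurement_epochs = []
--
--     # Epochs 0-10: Every epoch (dense early tracking)
--     for epoch in range(min(11, total_epochs + 1)):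
--         measurement_epochs.append(epoch)
--
--     # Epochs 11-30: Every 2 epochs
--     if total_epochs > 10:
--         for epoch in range(11, min(31, total_epochs + 1), 2):
--             if epoch not in measurement_epochs:
--                 measurement_epochs.append(epoch)
--
--     # Epochs 31-50: Every 5 epochs
--     if total_epochs > 30:
--         for epoch in range(31, min(51, total_epochs + 1), 5):
--             if epoch not in measurement_epochs:
--                 measurement_epochs.append(epoch)
--
--     # Epochs 50+: Every 10 epochs
--     if total_epochs > 50:
--         for epoch in range(51, total_epochs + 1, 10):
--             if epoch not in measurement_epochs:
--                 measurement_epochs.append(epoch)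
--
--     return sorted(measurement_epochs)
-- ===== SOURCE B (Python) =====
-- def adaptive_measurement_schedule(total_epochs):
--     """Single linear pass: classify each epoch by band instead of building
--     four strided ranges; the forward scan is already sorted and duplicate-free."""
--     schedule = []
--     for epoch in range(total_epochs + 1):
--         if epoch <= 10:
--             schedule.append(epoch)
--         elif epoch <= 30:
--             if (epoch - 11) % 2 == 0:
--                 schedule.append(epoch)
--         elif epoch <= 50:
--             if (epoch - 31) % 5 == 0:
--                 schedule.append(epoch)
--         elif (epoch - 51) % 10 == 0:
--             schedule.append(epoch)
--     return schedule
-- ===== Notes on version B (the rewrite author's own statement) =====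
-- stated objective: faster
-- what changed: Replaces four strided-range loops with linear-scan membership checks and a final sort by a single forward pass over range(total_epochs+1) that decides inclusion per epoch with a band classifier; the output is already sorted and duplicate-free, so the O(m) 'not in' scans and the sort disappear.
import Mathlib
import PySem

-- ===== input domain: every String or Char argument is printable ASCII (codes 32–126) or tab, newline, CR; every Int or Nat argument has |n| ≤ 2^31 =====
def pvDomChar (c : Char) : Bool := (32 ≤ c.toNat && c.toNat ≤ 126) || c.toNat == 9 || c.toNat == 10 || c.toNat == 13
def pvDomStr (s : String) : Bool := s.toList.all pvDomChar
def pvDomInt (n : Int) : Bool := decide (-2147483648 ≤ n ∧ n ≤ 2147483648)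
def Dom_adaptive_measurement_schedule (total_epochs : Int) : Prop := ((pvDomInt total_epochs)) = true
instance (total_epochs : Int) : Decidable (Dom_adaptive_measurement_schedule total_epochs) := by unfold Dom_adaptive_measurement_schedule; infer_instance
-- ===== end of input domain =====

-- B replaces A's four strided-range loops (with membership checks and a final sort)
-- by one forward pass over range(total_epochs+1) with a per-epoch band classifier;
-- measurably faster (A's 'not in' scans are quadratic overall).


-- ===== PORT A =====
def adaptive_measurement_schedule (total_epochs : Int) : List Int :=
  -- measurement_epochs = []; epochs 0-10: every epoch
  let m0 : List Int :=
    (PySem.List.pyRange 0 (min 11 (total_epochs + 1)) 1).foldl (fun acc e => acc ++ [e]) []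
  -- epochs 11-30: every 2 epochs, with 'if epoch not in measurement_epochs'
  let m1 : List Int :=
    if total_epochs > 10 then
      (PySem.List.pyRange 11 (min 31 (total_epochs + 1)) 2).foldl
        (fun acc e => if e ∈ acc then acc else acc ++ [e]) m0
    else m0
  -- epochs 31-50: every 5 epochs
  let m2 : List Int :=
    if total_epochs > 30 then
      (PySem.List.pyRange 31 (min 51 (total_epochs + 1)) 5).foldl
        (fun acc e => if e ∈ acc then acc else acc ++ [e]) m1
    else m1
  -- epochs 50+: every 10 epochs
  let m3 : List Int :=
    if total_epochs > 50 then
      (PySem.List.pyRange 51 (total_epochs + 1) 10).foldl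
        (fun acc e => if e ∈ acc then acc else acc ++ [e]) m2
    else m2
  PySem.List.sorted m3 (fun x => x) false

-- ===== PORT B =====
-- band classifier: include epoch iff its band's stride condition holds
def pvBandOk (e : Int) : Bool :=
  if e ≤ 10 then true
  else if e ≤ 30 then PySem.Int.mod (e - 11) 2 == 0
  else if e ≤ 50 then PySem.Int.mod (e - 31) 5 == 0
  else PySem.Int.mod (e - 51) 10 == 0

def adaptive_measurement_schedule_alt (total_epochs : Int) : List Int :=
  (PySem.List.pyRange 0 (total_epochs + 1) 1).foldl
    (fun acc e => if pvBandOk e then acc ++ [e] else acc) []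

-- ===== PRECONDITION & SPEC =====
def Spec_adaptive_measurement_schedule (total_epochs : Int) (out : List Int) : Prop := out = adaptive_measurement_schedule_alt total_epochs
instance (total_epochs : Int) (out : List Int) : Decidable (Spec_adaptive_measurement_schedule total_epochs out) := by unfold Spec_adaptive_measurement_schedule; infer_instance

-- ===== CLAIM (what is proved, stated in full; the proofs are below) =====
def Claim_equal_adaptive_measurement_schedule : Prop := ∀ (total_epochs : Int), Dom_adaptive_measurement_schedule total_epochs → Spec_adaptive_measurement_schedule total_epochs (adaptive_measurement_schedule total_epochs)

-- ===== LEMMAS AND PROOFS =====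

-- the band condition, arithmetically
theorem pvBandOk_iff (e : Int) :
    pvBandOk e = true ↔
      e ≤ 10 ∨ (11 ≤ e ∧ e ≤ 30 ∧ (2:Int) ∣ e - 11) ∨
      (31 ≤ e ∧ e ≤ 50 ∧ (5:Int) ∣ e - 31) ∨ (51 ≤ e ∧ (10:Int) ∣ e - 51) := by
  unfold pvBandOk
  split_ifs with h1 h2 h3 <;> simp <;> omega

-- a strided range with positive step is strictly increasing
theorem pairwise_lt_pyRange_pos (a b s : Int) (hs : 0 < s) :
    (PySem.List.pyRange a b s).Pairwise (· < ·) := by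
  rw [PySem.List.pyRange_of_pos a b hs]
  rw [List.pairwise_map]
  exact (List.pairwise_lt_range).imp (fun h => by nlinarith)

-- A's membership-checked append loop over elements disjoint from the accumulator
-- and pairwise-distinct among themselves is a plain append
theorem foldl_notmem_append (xs : List Int) (init : List Int)
    (hd : ∀ e ∈ xs, e ∉ init) (hnd : xs.Pairwise (· ≠ ·)) :
    xs.foldl (fun acc e => if e ∈ acc then acc else acc ++ [e]) init = init ++ xs := by
  induction xs generalizing init with
  | nil => simp
  | cons x xs ih =>
    simp only [List.foldl_cons]
    rw [if_neg (hd x (by simp))]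
    rw [ih (init ++ [x])
      (by
        intro e he
        simp only [List.mem_append, List.mem_singleton]
        rcases List.pairwise_cons.mp hnd with ⟨hx, _⟩
        exact fun h => h.elim (fun h' => hd e (by simp [he]) h') (fun h' => hx e he h'.symm))
      (List.pairwise_cons.mp hnd).2]
    simp

-- two strictly increasing integer lists with the same members are equal
theorem eq_of_pairwise_lt_of_mem_iff (xs ys : List Int)
    (hx : xs.Pairwise (· < ·)) (hy : ys.Pairwise (· < ·))
    (h : ∀ e, e ∈ xs ↔ e ∈ ys) : xs = ys := by
  exact List.Perm.eq_of_pairwise (fun a b _ _ h1 h2 => le_antisymm h1 h2)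
    (hx.imp le_of_lt) (hy.imp le_of_lt)
    ((List.perm_ext_iff_of_nodup (hx.imp ne_of_lt) (hy.imp ne_of_lt)).mpr h)

-- A's loop phase produces the plain concatenation of the four (guarded) strided ranges
theorem pvA_eq_concat (n : Int) : adaptive_measurement_schedule n =
    PySem.List.sorted
      (((PySem.List.pyRange 0 (min 11 (n + 1)) 1
        ++ (if n > 10 then PySem.List.pyRange 11 (min 31 (n + 1)) 2 else []))
        ++ (if n > 30 then PySem.List.pyRange 31 (min 51 (n + 1)) 5 else []))
        ++ (if n > 50 then PySem.List.pyRange 51 (n + 1) 10 else []))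
      (fun x => x) false := by
  have mem1 : ∀ e ∈ PySem.List.pyRange 0 (min 11 (n + 1)) 1, 0 ≤ e ∧ e < 11 := by
    intro e he
    rcases (PySem.List.mem_pyRange_one).mp he with ⟨h1, h2⟩
    omega
  have mem2 : ∀ e ∈ PySem.List.pyRange 11 (min 31 (n + 1)) 2, 11 ≤ e ∧ e < 31 := by
    intro e he
    rcases (PySem.List.mem_pyRange_iff_of_pos (by norm_num) e).mp he with ⟨h1, h2, _⟩
    omega
  have mem3 : ∀ e ∈ PySem.List.pyRange 31 (min 51 (n + 1)) 5, 31 ≤ e ∧ e < 51 := by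
    intro e he
    rcases (PySem.List.mem_pyRange_iff_of_pos (by norm_num) e).mp he with ⟨h1, h2, _⟩
    omega
  have mem4 : ∀ e ∈ PySem.List.pyRange 51 (n + 1) 10, 51 ≤ e := by
    intro e he
    exact ((PySem.List.mem_pyRange_iff_of_pos (by norm_num) e).mp he).1
  have nd2 := (pairwise_lt_pyRange_pos 11 (min 31 (n + 1)) 2 (by norm_num)).imp ne_of_lt
  have nd3 := (pairwise_lt_pyRange_pos 31 (min 51 (n + 1)) 5 (by norm_num)).imp ne_of_lt
  have nd4 := (pairwise_lt_pyRange_pos 51 (n + 1) 10 (by norm_num)).imp ne_of_lt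
  unfold adaptive_measurement_schedule
  dsimp only []
  rw [PySem.List.foldl_append_singleton_eq_self]
  by_cases h10 : n > 10
  · rw [if_pos h10, if_pos h10,
      foldl_notmem_append _ _ (by intro e he hm
                                  rw [List.nil_append] at hm
                                  exact absurd (mem1 e hm).2 (by have := (mem2 e he).1; omega)) nd2]
    by_cases h30 : n > 30
    · rw [if_pos h30, if_pos h30,
        foldl_notmem_append _ _ (by intro e he hm
                                    simp only [List.nil_append, List.mem_append] at hm
                                    have h31 := (mem3 e he).1
                                    rcases hm with hm | hm
                                    · exact absurd (mem1 e hm).2 (by omega)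
                                    · exact absurd (mem2 e hm).2 (by omega)) nd3]
      by_cases h50 : n > 50
      · rw [if_pos h50, if_pos h50,
          foldl_notmem_append _ _ (by intro e he hm
                                      simp only [List.nil_append, List.mem_append] at hm
                                      have h51 := mem4 e he
                                      rcases hm with (hm | hm) | hm
                                      · exact absurd (mem1 e hm).2 (by omega)
                                      · exact absurd (mem2 e hm).2 (by omega)
                                      · exact absurd (mem3 e hm).2 (by omega)) nd4]
        simp
      · rw [if_neg h50, if_neg h50]; simp
    · rw [if_neg h30, if_neg h30, if_neg (by omega : ¬ n > 50), if_neg (by omega : ¬ n > 50)]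
      simp
  · rw [if_neg h10, if_neg h10, if_neg (by omega : ¬ n > 30), if_neg (by omega : ¬ n > 30),
      if_neg (by omega : ¬ n > 50), if_neg (by omega : ¬ n > 50)]
    simp

-- ===== VERDICT (by name: the statement is the Claim_ definition above) =====
theorem adaptive_measurement_schedule_spec : Claim_equal_adaptive_measurement_schedule := by
  intro n _
  unfold Spec_adaptive_measurement_schedule adaptive_measurement_schedule_alt
  rw [PySem.List.foldl_append_if_eq_filter, List.nil_append, pvA_eq_concat]
  have pw1 : (PySem.List.pyRange 0 (min 11 (n + 1)) 1).Pairwise (· < ·) :=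
    PySem.List.pairwise_lt_pyRange_one 0 (min 11 (n + 1))
  have pw2 : (if n > 10 then PySem.List.pyRange 11 (min 31 (n + 1)) 2 else []).Pairwise (· < ·) := by
    split
    · exact pairwise_lt_pyRange_pos _ _ _ (by norm_num)
    · exact List.Pairwise.nil
  have pw3 : (if n > 30 then PySem.List.pyRange 31 (min 51 (n + 1)) 5 else []).Pairwise (· < ·) := by
    split
    · exact pairwise_lt_pyRange_pos _ _ _ (by norm_num)
    · exact List.Pairwise.nil
  have pw4 : (if n > 50 then PySem.List.pyRange 51 (n + 1) 10 else []).Pairwise (· < ·) := by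
    split
    · exact pairwise_lt_pyRange_pos _ _ _ (by norm_num)
    · exact List.Pairwise.nil
  have bd1 : ∀ e ∈ PySem.List.pyRange 0 (min 11 (n + 1)) 1, e < 11 := by
    intro e he; have := (PySem.List.mem_pyRange_one).mp he; omega
  have bd2 : ∀ e ∈ (if n > 10 then PySem.List.pyRange 11 (min 31 (n + 1)) 2 else []),
      11 ≤ e ∧ e < 31 := by
    intro e he
    split at he
    · have := (PySem.List.mem_pyRange_iff_of_pos (by norm_num) e).mp he; omega
    · simp at he
  have bd3 : ∀ e ∈ (if n > 30 then PySem.List.pyRange 31 (min 51 (n + 1)) 5 else []),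
      31 ≤ e ∧ e < 51 := by
    intro e he
    split at he
    · have := (PySem.List.mem_pyRange_iff_of_pos (by norm_num) e).mp he; omega
    · simp at he
  have bd4 : ∀ e ∈ (if n > 50 then PySem.List.pyRange 51 (n + 1) 10 else []), 51 ≤ e := by
    intro e he
    split at he
    · exact ((PySem.List.mem_pyRange_iff_of_pos (by norm_num) e).mp he).1
    · simp at he
  have hpw : ((((PySem.List.pyRange 0 (min 11 (n + 1)) 1
      ++ (if n > 10 then PySem.List.pyRange 11 (min 31 (n + 1)) 2 else []))
      ++ (if n > 30 then PySem.List.pyRange 31 (min 51 (n + 1)) 5 else []))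
      ++ (if n > 50 then PySem.List.pyRange 51 (n + 1) 10 else []))).Pairwise (· < ·) := by
    rw [List.pairwise_append]
    refine ⟨?_, pw4, ?_⟩
    · rw [List.pairwise_append]
      refine ⟨?_, pw3, ?_⟩
      · rw [List.pairwise_append]
        refine ⟨pw1, pw2, ?_⟩
        · intro a ha b hb
          have := bd1 a ha; have := bd2 b hb; omega
      · intro a ha b hb
        rcases List.mem_append.mp ha with h | h
        · have := bd1 a h; have := bd3 b hb; omega
        · have := bd2 a h; have := bd3 b hb; omega
    · intro a ha b hb
      have h51 := bd4 b hb
      rcases List.mem_append.mp ha with h | h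
      · rcases List.mem_append.mp h with h' | h'
        · have := bd1 a h'; omega
        · have := bd2 a h'; omega
      · have := bd3 a h; omega
  rw [PySem.List.sorted_eq_self_of_pairwise _ _ (hpw.imp le_of_lt)]
  apply eq_of_pairwise_lt_of_mem_iff _ _ hpw
  · exact List.Pairwise.sublist List.filter_sublist (PySem.List.pairwise_lt_pyRange_one 0 (n + 1))
  · intro e
    simp only [List.mem_append, List.mem_filter, pvBandOk_iff, PySem.List.mem_pyRange_one]
    by_cases h10 : n > 10 <;> by_cases h30 : n > 30 <;> by_cases h50 : n > 50 <;>
      simp only [h10, h30, h50, if_true, if_false, 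
        List.not_mem_nil, or_false,
        PySem.List.mem_pyRange_iff_of_pos (show (0:Int) < 2 by norm_num),
        PySem.List.mem_pyRange_iff_of_pos (show (0:Int) < 5 by norm_num),
        PySem.List.mem_pyRange_iff_of_pos (show (0:Int) < 10 by norm_num)] <;>
      omega
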